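-- pv_equiv track=rewrite | github.com/orcunkoraliseri/idf_reader | test_shw_kitchen_school.py | parse_idf_blocks
-- ===== SOURCE A (Python) =====
-- def strip_comments(text):
--     """Remove inline IDF comments (everything after '!' on each line)."""
--     lines = []
--     for line in text.split("\n"):
--         lines.append(line.split("!")[0])
--     return "\n".join(lines)
--
-- def parse_idf_blocks(idf_text, object_type):
--     """
--     Yields lists of field strings for every IDF object of *object_type*.
--     Comments are stripped before field splitting so values are preserved.
--     """
--     clean = strip_comments(idf_text)
--     upper = clean.upper()
--     search = object_type.upper() + ","
--     pos = 0
--     while True: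
--         idx = upper.find(search, pos)
--         if idx == -1:
--             break
--         end = clean.find(";", idx)
--         if end == -1:
--             break
--         block = clean[idx + len(search): end]
--         fields = [f.strip() for f in block.split(",")]
--         yield fields
--         pos = end + 1
-- ===== SOURCE B (Python) =====
-- def strip_comments(text):
--     """Remove inline IDF comments (everything after '!' on each line)."""
--     lines = []
--     for line in text.split("\n"):
--         lines.append(line.split("!")[0])
--     return "\n".join(lines)
--
-- def parse_idf_blocks(idf_text, object_type):
--     """
--     Yields lists of field strings for every IDF object of *object_type*.
--     Split the comment-stripped text into ';'-terminated statements first,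
--     then scan each statement once (case-insensitively) for the object type.
--     """
--     clean = strip_comments(idf_text)
--     search = object_type.upper() + ","
--     segments = clean.split(";")
--     for seg in segments[:-1]:
--         i = seg.upper().find(search)
--         if i != -1:
--             yield [f.strip() for f in seg[i + len(search):].split(",")]
-- ===== Notes on version B (the rewrite author's own statement) =====
-- stated objective: alternative
-- what changed: Replaces the stateful while/find scan with moving pos over the whole cleaned text by a split of the text into ';'-terminated statements followed by one per-statement case-insensitive substring search.
-- outside the precondition, e.g. on parse_idf_blocks('A;B,x;', 'A;B'): A returns [['']], B returns []
import Mathlib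
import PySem

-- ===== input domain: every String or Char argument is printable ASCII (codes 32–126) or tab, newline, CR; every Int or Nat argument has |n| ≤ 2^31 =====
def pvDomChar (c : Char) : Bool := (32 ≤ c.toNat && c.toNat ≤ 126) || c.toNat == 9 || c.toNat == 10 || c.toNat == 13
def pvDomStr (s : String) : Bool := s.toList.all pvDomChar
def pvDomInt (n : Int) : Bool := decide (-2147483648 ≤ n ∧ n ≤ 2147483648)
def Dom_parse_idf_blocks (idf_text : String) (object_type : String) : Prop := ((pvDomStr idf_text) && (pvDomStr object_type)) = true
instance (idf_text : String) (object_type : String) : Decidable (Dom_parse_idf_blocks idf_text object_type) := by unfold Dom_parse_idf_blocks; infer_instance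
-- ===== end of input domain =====

-- B re-decomposes A's stateful while/find scan as split-into-';'-statements + one per-statement
-- case-insensitive search (objective: alternative; same asymptotic cost); return value only (generators are materialised as lists).

-- shared helper: both Pythons call the same module-level strip_comments
def stripCommentsC (t : List Char) : List Char :=
  PySem.Chars.join ['\n']
    ((PySem.Chars.splitOn t ['\n']).map (fun line => PySem.List.pyGetD (PySem.Chars.splitOn line ['!']) 0 []))

-- shared comprehension [f.strip() for f in block.split(",")], identical in both Pythons
def fieldsOf (block : List Char) : List String :=
  (PySem.Chars.splitOn block [',']).map (fun f => String.ofList (PySem.Chars.strip f))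

-- ===== PORT A =====
def aLoop (fuel : Nat) (clean upper search : List Char) (pos : Int) : List (List String) :=
  match fuel with
  | 0 => []
  | fuel + 1 =>
    let idx := PySem.Chars.findFrom upper search pos none
    if idx = -1 then []
    else
      let endd := PySem.Chars.findFrom clean [';'] idx none
      if endd = -1 then []
      else
        fieldsOf (PySem.List.slice clean (some (idx + (search.length : Int))) (some endd)) ::
          aLoop fuel clean upper search (endd + 1)

def parse_idf_blocks (idf_text : String) (object_type : String) : List (List String) :=
  let clean := stripCommentsC idf_text.toList
  let upper := PySem.Chars.upper clean
  let search := PySem.Chars.upper object_type.toList ++ [',']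
  -- fuel clean.length + 1 bounds the iterations: pos starts at 0 and strictly increases past each ';'
  aLoop (clean.length + 1) clean upper search 0

-- ===== PORT B =====
def parse_idf_blocks_alt (idf_text : String) (object_type : String) : List (List String) :=
  let clean := stripCommentsC idf_text.toList
  let search := PySem.Chars.upper object_type.toList ++ [',']
  -- segments[:-1] = all but the last piece of clean.split(";")
  ((PySem.Chars.splitOn clean [';']).dropLast).filterMap (fun seg =>
    let i := PySem.Chars.find (PySem.Chars.upper seg) search
    if i = -1 then none
    else some (fieldsOf (PySem.List.slice seg (some (i + (search.length : Int))) none)))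

-- ===== PRECONDITION & SPEC =====
-- Pre_ excludes object types containing ';': there A's flat scan can match the search string across
-- statement terminators, an artefact of its implementation (no IDF object type contains ';').
def Pre_parse_idf_blocks (idf_text : String) (object_type : String) : Prop :=
  ';' ∉ object_type.toList
instance (idf_text : String) (object_type : String) : Decidable (Pre_parse_idf_blocks idf_text object_type) := by unfold Pre_parse_idf_blocks; infer_instance

def pvWitness_parse_idf_blocks : String × String := ("Zone,z1;\nWaterHeater:Mixed, a, 1 ;", "WaterHeater:Mixed")

def Spec_parse_idf_blocks (idf_text : String) (object_type : String) (out : List (List String)) : Prop := out = parse_idf_blocks_alt idf_text object_type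
instance (idf_text : String) (object_type : String) (out : List (List String)) : Decidable (Spec_parse_idf_blocks idf_text object_type out) := by unfold Spec_parse_idf_blocks; infer_instance

-- ===== CLAIM (what is proved, stated in full; the proofs are below) =====
def Claim_equal_parse_idf_blocks : Prop := ∀ (idf_text : String) (object_type : String), Dom_parse_idf_blocks idf_text object_type → Pre_parse_idf_blocks idf_text object_type → Spec_parse_idf_blocks idf_text object_type (parse_idf_blocks idf_text object_type)

-- ===== LEMMAS AND PROOFS =====

-- A's scan rephrased on the suffix of clean starting at pos
def sLoop (search : List Char) : Nat → List Char → List (List String)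
  | 0, _ => []
  | fuel + 1, t =>
    let i := PySem.Chars.find (PySem.Chars.upper t) search
    if i = -1 then []
    else
      let e := PySem.Chars.findFrom t [';'] i none
      if e = -1 then []
      else
        fieldsOf (PySem.List.slice t (some (i + (search.length : Int))) (some e)) ::
          sLoop search fuel (t.drop (e + 1).toNat)

-- B's per-statement step, named for the proofs
def bSeg (search : List Char) (seg : List Char) : Option (List String) :=
  let i := PySem.Chars.find (PySem.Chars.upper seg) search
  if i = -1 then none
  else some (fieldsOf (PySem.List.slice seg (some (i + (search.length : Int))) none))


theorem upperChar_semi {c : Char} (h : PySem.Chars.upperChar c = ';') : c = ';' := by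
  unfold PySem.Chars.upperChar PySem.Chars.islower at h
  split at h
  · next hl =>
    simp only [Bool.and_eq_true, decide_eq_true_eq, Char.le_def, UInt32.le_iff_toNat_le] at hl
    have hl' : 97 ≤ c.toNat ∧ c.toNat ≤ 122 := hl
    have h2 : (Char.ofNat (c.toNat - 32)).toNat = 59 := by rw [h]; rfl
    rw [Char.toNat_ofNat] at h2
    have hv : (c.toNat - 32).isValidChar := by left; omega
    rw [if_pos hv] at h2
    omega
  · exact h

theorem mem_semi_upper (x : List Char) : ';' ∈ PySem.Chars.upper x ↔ ';' ∈ x := by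
  unfold PySem.Chars.upper
  constructor
  · intro h
    obtain ⟨c, hc, he⟩ := List.mem_map.mp h
    rwa [upperChar_semi he] at hc
  · intro h
    exact List.mem_map.mpr ⟨';', h, rfl⟩

theorem find_no_semi {t : List Char} (h : ';' ∉ t) : PySem.Chars.find t [';'] = -1 := by
  rw [PySem.Chars.find_eq_neg_one_iff]
  intro hinf
  exact h (hinf.mem (by simp))

theorem prefix_append_semi {sub x : List Char} (hs : ';' ∉ sub) (r : List Char) :
    sub <+: x ++ ';' :: r ↔ sub <+: x := by
  constructor
  · intro h
    by_cases hlen : sub.length ≤ x.length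
    · have heq : sub = (x ++ ';' :: r).take sub.length := List.prefix_iff_eq_take.mp h
      rw [List.take_append_of_le_length hlen] at heq
      exact heq ▸ List.take_prefix _ _
    · exfalso
      have hx : x.length < sub.length := Nat.lt_of_not_le hlen
      have hget := h.getElem (i := x.length) hx
      rw [List.getElem_append_right (le_refl x.length)] at hget
      simp at hget
      exact hs (hget ▸ List.getElem_mem hx)
  · intro h
    exact h.trans (x.prefix_append _)

theorem find_eq_of {s sub : List Char} {k : Nat} (h1 : sub <+: s.drop k)
    (h2 : ∀ i < k, ¬ sub <+: s.drop i) : PySem.Chars.find s sub = (k : Int) := by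
  have hinf : sub <:+: s := h1.isInfix.trans (List.drop_suffix k s).isInfix
  have hpos : 0 ≤ PySem.Chars.find s sub := (PySem.Chars.find_nonneg_iff s sub).mpr hinf
  obtain ⟨hsp1, hsp2⟩ := PySem.Chars.find_spec hpos
  have hm : (PySem.Chars.find s sub).toNat = k := by
    rcases Nat.lt_trichotomy (PySem.Chars.find s sub).toNat k with hlt | heq | hgt
    · exact absurd hsp1 (h2 _ hlt)
    · exact heq
    · exact absurd h1 (hsp2 _ hgt)
  omega

theorem find_semi {x : List Char} (h : ';' ∉ x) (r : List Char) :
    PySem.Chars.find (x ++ ';' :: r) [';'] = (x.length : Int) := by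
  apply find_eq_of
  · rw [List.drop_append_of_le_length (le_refl _)]
    simp
  · intro i hi hpre
    rw [List.drop_append_of_le_length (le_of_lt hi), List.drop_eq_getElem_cons hi] at hpre
    simp only [List.cons_append, List.cons_prefix_cons] at hpre
    exact h (hpre.1 ▸ List.getElem_mem hi)

theorem find_append_semi {sub : List Char} (hs : ';' ∉ sub) (x r : List Char) :
    PySem.Chars.find (x ++ ';' :: r) sub =
      if PySem.Chars.find x sub = -1 then
        (if PySem.Chars.find r sub = -1 then -1 else (x.length : Int) + 1 + PySem.Chars.find r sub)
      else PySem.Chars.find x sub := by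
  have hnox : PySem.Chars.find x sub = -1 → ∀ i, ¬ sub <+: x.drop i := by
    intro hfx i hpre
    rw [PySem.Chars.find_eq_neg_one_iff] at hfx
    exact hfx (hpre.isInfix.trans (List.drop_suffix i x).isInfix)
  split
  · next hfx =>
    split
    · next hfr =>
      rw [PySem.Chars.find_eq_neg_one_iff]
      intro hinf
      obtain ⟨jj, hjj⟩ := (PySem.Chars.exists_prefix_drop_iff_isIn sub _).mpr
        ((PySem.Chars.isIn_iff_infix sub _).mpr hinf)
      by_cases hjx : jj ≤ x.length
      · rw [List.drop_append_of_le_length hjx, prefix_append_semi hs] at hjj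
        exact hnox hfx jj hjj
      · rw [List.drop_append, List.drop_of_length_le (by omega)] at hjj
        simp only [List.nil_append] at hjj
        have hd : (';' :: r).drop (jj - x.length) = r.drop (jj - x.length - 1) := by
          have : jj - x.length = (jj - x.length - 1) + 1 := by omega
          rw [this]; rfl
        rw [hd] at hjj
        rw [PySem.Chars.find_eq_neg_one_iff] at hfr
        exact hfr (hjj.isInfix.trans (List.drop_suffix _ r).isInfix)
    · next hfr =>
      have hr0 : 0 ≤ PySem.Chars.find r sub := by
        have := PySem.Chars.neg_one_le_find r sub; omega
      set j := (PySem.Chars.find r sub).toNat with hj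
      obtain ⟨hsp1, hsp2⟩ := PySem.Chars.find_spec hr0
      have : PySem.Chars.find (x ++ ';' :: r) sub = ((x.length + 1 + j : Nat) : Int) := by
        apply find_eq_of
        · rw [List.drop_append, List.drop_of_length_le (by omega)]
          have hd : (';' :: r).drop (x.length + 1 + j - x.length) = r.drop j := by
            have : x.length + 1 + j - x.length = j + 1 := by omega
            rw [this]; rfl
          simpa [hd] using hsp1
        · intro i hi hpre
          by_cases hix : i ≤ x.length
          · rw [List.drop_append_of_le_length hix, prefix_append_semi hs] at hpre
            exact hnox hfx i hpre
          · rw [List.drop_append, List.drop_of_length_le (by omega)] at hpre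
            simp only [List.nil_append] at hpre
            have h2 : sub <+: r.drop (i - x.length - 1) := by
              have : (';' :: r).drop (i - x.length) = r.drop (i - x.length - 1) := by
                have : i - x.length = (i - x.length - 1) + 1 := by omega
                rw [this]; rfl
              rwa [this] at hpre
            exact hsp2 _ (by omega) h2
      rw [this]
      have := Int.toNat_of_nonneg hr0
      push_cast
      omega
  · next hfx =>
    have hx0 : 0 ≤ PySem.Chars.find x sub := by
      have := PySem.Chars.neg_one_le_find x sub; omega
    set j := (PySem.Chars.find x sub).toNat with hj
    obtain ⟨hsp1, hsp2⟩ := PySem.Chars.find_spec hx0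
    have hjx : j ≤ x.length := by
      have := PySem.Chars.find_le_length x sub; omega
    have : PySem.Chars.find (x ++ ';' :: r) sub = (j : Int) := by
      apply find_eq_of
      · rw [List.drop_append_of_le_length hjx, prefix_append_semi hs]
        exact hsp1
      · intro i hi hpre
        rw [List.drop_append_of_le_length (by omega), prefix_append_semi hs] at hpre
        exact hsp2 _ hi hpre
    omega


theorem go_acc (sep : List Char) (fuel : Nat) : ∀ (l cur : List Char) (acc : List (List Char)),
    PySem.Chars.splitOn.go sep fuel l cur acc = acc.reverse ++ PySem.Chars.splitOn.go sep fuel l cur [] := by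
  induction fuel with
  | zero => intro l cur acc; simp [PySem.Chars.splitOn.go]
  | succ fuel ih =>
    intro l cur acc
    cases l with
    | nil => simp [PySem.Chars.splitOn.go]
    | cons c rest =>
      rw [PySem.Chars.splitOn.go]
      conv_rhs => rw [PySem.Chars.splitOn.go]
      split
      · rw [ih _ [] (cur.reverse :: acc), ih _ [] ([cur.reverse])]
        simp
      · rw [ih _ (c :: cur) acc]

theorem go_no_semi : ∀ {l : List Char}, ';' ∉ l → ∀ (fuel : Nat) (cur : List Char) (acc : List (List Char)),
    PySem.Chars.splitOn.go [';'] fuel l cur acc = ((cur.reverse ++ l) :: acc).reverse := by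
  intro l
  induction l with
  | nil => intro _ fuel cur acc; cases fuel <;> simp [PySem.Chars.splitOn.go]
  | cons c rest ih =>
    intro h fuel cur acc
    cases fuel with
    | zero => simp [PySem.Chars.splitOn.go]
    | succ fuel =>
      rw [PySem.Chars.splitOn.go]
      have hc : c ≠ ';' := by intro he; exact h (he ▸ List.mem_cons_self)
      rw [if_neg (by simp [List.isPrefixOf]; intro he; exact absurd he.symm hc)]
      rw [ih (fun hm => h (List.mem_cons_of_mem _ hm)) fuel (c :: cur) acc]
      simp

theorem go_step {seg : List Char} (h : ';' ∉ seg) (rest : List Char) :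
    ∀ (fuel : Nat) (cur : List Char) (acc : List (List Char)),
    PySem.Chars.splitOn.go [';'] (seg.length + 1 + fuel) (seg ++ ';' :: rest) cur acc =
      PySem.Chars.splitOn.go [';'] fuel rest [] ((cur.reverse ++ seg) :: acc) := by
  induction seg with
  | nil =>
    intro fuel cur acc
    simp only [List.length_nil, List.nil_append]
    rw [show 0 + 1 + fuel = fuel + 1 by omega, PySem.Chars.splitOn.go]
    rw [if_pos (by simp [List.isPrefixOf])]
    simp
  | cons c seg ih =>
    intro fuel cur acc
    have hc : c ≠ ';' := by intro he; exact h (he ▸ List.mem_cons_self)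
    have : (c :: seg).length + 1 + fuel = (seg.length + 1 + fuel) + 1 := by simp; omega
    rw [this, List.cons_append, PySem.Chars.splitOn.go]
    rw [if_neg (by simp [List.isPrefixOf]; intro he; exact absurd he.symm hc)]
    rw [ih (fun hm => h (List.mem_cons_of_mem _ hm)) fuel (c :: cur) acc]
    simp

theorem splitOn_no_semi {t : List Char} (h : ';' ∉ t) : PySem.Chars.splitOn t [';'] = [t] := by
  unfold PySem.Chars.splitOn
  rw [go_no_semi h]
  simp

theorem splitOn_cons {seg : List Char} (h : ';' ∉ seg) (rest : List Char) :
    PySem.Chars.splitOn (seg ++ ';' :: rest) [';'] = seg :: PySem.Chars.splitOn rest [';'] := by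
  unfold PySem.Chars.splitOn
  rw [show (seg ++ ';' :: rest).length + 1 = seg.length + 1 + (rest.length + 1) by simp; omega]
  rw [go_step h rest (rest.length + 1) [] []]
  rw [go_acc]
  simp

theorem go_ne_nil (sep : List Char) (fuel : Nat) : ∀ (l cur : List Char) (acc : List (List Char)),
    PySem.Chars.splitOn.go sep fuel l cur acc ≠ [] := by
  induction fuel with
  | zero => intro l cur acc; simp [PySem.Chars.splitOn.go]
  | succ fuel ih =>
    intro l cur acc
    cases l with
    | nil => simp [PySem.Chars.splitOn.go]
    | cons c rest =>
      rw [PySem.Chars.splitOn.go]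
      split
      · exact ih _ _ _
      · exact ih _ _ _

theorem splitOn_ne_nil (t : List Char) : PySem.Chars.splitOn t [';'] ≠ [] :=
  go_ne_nil _ _ _ _ _

theorem upper_length (l : List Char) : (PySem.Chars.upper l).length = l.length := by
  simp [PySem.Chars.upper]

theorem upper_drop (l : List Char) (n : Nat) :
    (PySem.Chars.upper l).drop n = PySem.Chars.upper (l.drop n) := by
  simp [PySem.Chars.upper, List.map_drop]

theorem aLoop_eq_sLoop (search clean : List Char) :
    ∀ (fuel : Nat) (p : Nat), p ≤ clean.length →
      aLoop fuel clean (PySem.Chars.upper clean) search (p : Int) = sLoop search fuel (clean.drop p) := by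
  intro fuel
  induction fuel with
  | zero => intro p hp; simp [aLoop, sLoop]
  | succ fuel ih =>
    intro p hp
    simp only [aLoop, sLoop]
    rw [PySem.Chars.findFrom_natCast _ search p (by rw [upper_length]; exact hp)]
    rw [upper_drop]
    by_cases hneg : PySem.Chars.find (PySem.Chars.upper (clean.drop p)) search = -1
    · simp [hneg]
    · set t := clean.drop p with ht
      set i0 := PySem.Chars.find (PySem.Chars.upper t) search with hi0
      have hge : 0 ≤ i0 := by
        have := PySem.Chars.neg_one_le_find (PySem.Chars.upper t) search
        rw [← hi0] at this; omega
      set j := i0.toNat with hjdef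
      have hij : i0 = (j : Int) := by omega
      have hjt : j ≤ t.length := by
        have := PySem.Chars.find_le_length (PySem.Chars.upper t) search
        rw [← hi0, upper_length] at this; omega
      have hlen_t : t.length = clean.length - p := by rw [ht]; simp
      rw [if_neg hneg]
      have hpj : (p : Int) + i0 = ((p + j : Nat) : Int) := by omega
      rw [hpj]
      rw [if_neg (by push_cast; omega), if_neg hneg]
      rw [PySem.Chars.findFrom_natCast clean [';'] (p + j) (by omega)]
      have hdj : clean.drop (p + j) = t.drop j := by
        rw [ht, List.drop_drop, Nat.add_comm]
      rw [hdj]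
      rw [hij, PySem.Chars.findFrom_natCast t [';'] j hjt]
      by_cases he : PySem.Chars.find (t.drop j) [';'] = -1
      · simp [he]
      · set e0 := PySem.Chars.find (t.drop j) [';'] with he0def
        have hek : 0 ≤ e0 := by
          have := PySem.Chars.neg_one_le_find (t.drop j) [';']
          rw [← he0def] at this; omega
        set k := e0.toNat with hkdef
        have hke : e0 = (k : Int) := by omega
        have hsem_pre : [';'] <+: (t.drop j).drop k := by
          have h1 := (PySem.Chars.find_spec (s := t.drop j) (sub := [';']) (by rw [← he0def]; omega)).1
          rw [← he0def, ← hkdef] at h1; exact h1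
        have hkb : k + 1 ≤ t.length - j := by
          have h2 := hsem_pre.length_le
          simp at h2; omega
        rw [if_neg he, if_neg he]
        have hc1 : ((p + j : Nat) : Int) + e0 = ((p + j + k : Nat) : Int) := by omega
        have hc2 : ((j : Nat) : Int) + e0 = ((j + k : Nat) : Int) := by omega
        rw [hc1, hc2]
        rw [if_neg (by push_cast; omega), if_neg (by push_cast; omega)]
        have hc3 : ((p + j : Nat) : Int) + (search.length : Int) = ((p + j + search.length : Nat) : Int) := by push_cast; ring
        have hc4 : ((j : Nat) : Int) + (search.length : Int) = ((j + search.length : Nat) : Int) := by push_cast; ring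
        rw [hc3, hc4]
        rw [PySem.List.slice_natCast, PySem.List.slice_natCast]
        have hdjs : clean.drop (p + j + search.length) = t.drop (j + search.length) := by
          rw [ht, List.drop_drop]; congr 1; omega
        have hcnt : p + j + k - (p + j + search.length) = j + k - (j + search.length) := by omega
        rw [hdjs, hcnt]
        have hc5 : ((p + j + k : Nat) : Int) + 1 = ((p + j + k + 1 : Nat) : Int) := by push_cast; ring
        have hc6 : ((j + k : Nat) : Int) + 1 = ((j + k + 1 : Nat) : Int) := by push_cast; ring
        rw [hc5, hc6, Int.toNat_natCast]
        have hdrec : t.drop (j + k + 1) = clean.drop (p + j + k + 1) := by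
          rw [ht, List.drop_drop]; congr 1; omega
        rw [hdrec, ih (p + j + k + 1) (by omega)]


theorem upperChar_semi_self : PySem.Chars.upperChar ';' = ';' := by decide

theorem upper_append_semi (seg rest : List Char) :
    PySem.Chars.upper (seg ++ ';' :: rest) =
      PySem.Chars.upper seg ++ ';' :: PySem.Chars.upper rest := by
  simp [PySem.Chars.upper, upperChar_semi_self]

theorem sLoop_skip {search seg : List Char} (hs : ';' ∉ search)
    (hno : PySem.Chars.find (PySem.Chars.upper seg) search = -1) (rest : List Char) (fuel : Nat) :
    sLoop search fuel (seg ++ ';' :: rest) = sLoop search fuel rest := by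
  cases fuel with
  | zero => rfl
  | succ fuel =>
    simp only [sLoop]
    rw [upper_append_semi, find_append_semi hs, if_pos hno, upper_length]
    set i_r := PySem.Chars.find (PySem.Chars.upper rest) search with hir_def
    by_cases hir : i_r = -1
    · simp [hir]
    · have hge : 0 ≤ i_r := by
        have := PySem.Chars.neg_one_le_find (PySem.Chars.upper rest) search
        rw [← hir_def] at this; omega
      set j := i_r.toNat with hjdef
      have hij : i_r = (j : Int) := by omega
      have hjr : j ≤ rest.length := by
        have := PySem.Chars.find_le_length (PySem.Chars.upper rest) search
        rw [← hir_def, upper_length] at this; omega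
      rw [if_neg hir]
      have hc0 : (seg.length : Int) + 1 + i_r = ((seg.length + 1 + j : Nat) : Int) := by omega
      rw [hc0]
      rw [if_neg (by push_cast; omega), if_neg hir]
      rw [PySem.Chars.findFrom_natCast (seg ++ ';' :: rest) [';'] (seg.length + 1 + j) (by simp; omega)]
      have hdp : (seg ++ ';' :: rest).drop (seg.length + 1 + j) = rest.drop j := by
        rw [List.drop_append, List.drop_of_length_le (by omega)]
        rw [show seg.length + 1 + j - seg.length = j + 1 by omega]
        rfl
      rw [hdp]
      rw [hij, PySem.Chars.findFrom_natCast rest [';'] j hjr]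
      by_cases he : PySem.Chars.find (rest.drop j) [';'] = -1
      · simp [he]
      · set e0 := PySem.Chars.find (rest.drop j) [';'] with he0def
        have hek : 0 ≤ e0 := by
          have := PySem.Chars.neg_one_le_find (rest.drop j) [';']
          rw [← he0def] at this; omega
        set k := e0.toNat with hkdef
        rw [if_neg he, if_neg he]
        have hc1 : ((seg.length + 1 + j : Nat) : Int) + e0 = ((seg.length + 1 + j + k : Nat) : Int) := by omega
        have hc2 : ((j : Nat) : Int) + e0 = ((j + k : Nat) : Int) := by omega
        rw [hc1, hc2]
        rw [if_neg (by push_cast; omega), if_neg (by push_cast; omega)]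
        have hc3 : ((seg.length + 1 + j : Nat) : Int) + (search.length : Int) = ((seg.length + 1 + j + search.length : Nat) : Int) := by push_cast; ring
        have hc4 : ((j : Nat) : Int) + (search.length : Int) = ((j + search.length : Nat) : Int) := by push_cast; ring
        rw [hc3, hc4]
        rw [PySem.List.slice_natCast, PySem.List.slice_natCast]
        have hdp2 : (seg ++ ';' :: rest).drop (seg.length + 1 + j + search.length) = rest.drop (j + search.length) := by
          rw [List.drop_append, List.drop_of_length_le (by omega)]
          rw [show seg.length + 1 + j + search.length - seg.length = (j + search.length) + 1 by omega]
          rfl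
        have hcnt : seg.length + 1 + j + k - (seg.length + 1 + j + search.length) = j + k - (j + search.length) := by omega
        rw [hdp2, hcnt]
        have hc5 : ((seg.length + 1 + j + k : Nat) : Int) + 1 = ((seg.length + 1 + j + k + 1 : Nat) : Int) := by push_cast; ring
        have hc6 : ((j + k : Nat) : Int) + 1 = ((j + k + 1 : Nat) : Int) := by push_cast; ring
        rw [hc5, hc6, Int.toNat_natCast, Int.toNat_natCast]
        have hdp3 : (seg ++ ';' :: rest).drop (seg.length + 1 + j + k + 1) = rest.drop (j + k + 1) := by
          rw [List.drop_append, List.drop_of_length_le (by omega)]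
          rw [show seg.length + 1 + j + k + 1 - seg.length = (j + k + 1) + 1 by omega]
          rfl
        rw [hdp3]


theorem sLoop_eq_bBody {search : List Char} (hne : search ≠ []) (hs : ';' ∉ search) :
    ∀ (n : Nat) (t : List Char), t.length ≤ n → ∀ fuel, t.length < fuel →
      sLoop search fuel t = ((PySem.Chars.splitOn t [';']).dropLast).filterMap (bSeg search) := by
  intro n
  induction n with
  | zero =>
    intro t hle fuel hfuel
    have ht : t = [] := List.eq_nil_of_length_eq_zero (Nat.le_zero.mp hle)
    subst ht
    cases fuel with
    | zero => omega
    | succ fuel =>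
      rw [splitOn_no_semi (by simp)]
      simp only [sLoop]
      have hf : PySem.Chars.find (PySem.Chars.upper []) search = -1 := by
        rw [PySem.Chars.find_eq_neg_one_iff]
        intro hinf
        exact hne (List.eq_nil_of_infix_nil hinf)
      simp [hf]
  | succ n ihn =>
    intro t hle fuel hfuel
    by_cases hsem : ';' ∈ t
    · have hdw : t.dropWhile (fun c => c != ';') ≠ [] := by
        intro h0
        rw [List.dropWhile_eq_nil_iff] at h0
        have := h0 _ hsem
        simp at this
      set seg := t.takeWhile (fun c => c != ';') with hseg_def
      set rest := (t.dropWhile (fun c => c != ';')).tail with hrest_def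
      have hhead : (t.dropWhile (fun c => c != ';')).head hdw = ';' := by
        have := List.head_dropWhile_not (fun c => c != ';') hdw
        simpa using this
      have hdecomp : t = seg ++ ';' :: rest := by
        conv_lhs => rw [← List.takeWhile_append_dropWhile (p := fun c => c != ';') (l := t)]
        rw [← List.cons_head_tail hdw, hhead]
      have hnseg : ';' ∉ seg := by
        intro hm
        have := List.mem_takeWhile_imp hm
        simp at this
      have hlen : t.length = seg.length + 1 + rest.length := by
        rw [hdecomp]; simp; omega
      by_cases hocc : PySem.Chars.find (PySem.Chars.upper seg) search = -1
      · rw [hdecomp, sLoop_skip hs hocc, splitOn_cons hnseg,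
            List.dropLast_cons_of_ne_nil (splitOn_ne_nil rest),
            List.filterMap_cons_none (by simp [bSeg, hocc])]
        exact ihn rest (by omega) fuel (by omega)
      · cases fuel with
        | zero => omega
        | succ fuel =>
          set i0 := PySem.Chars.find (PySem.Chars.upper seg) search with hi0
          have hge : 0 ≤ i0 := by
            have := PySem.Chars.neg_one_le_find (PySem.Chars.upper seg) search
            rw [← hi0] at this; omega
          set j := i0.toNat with hjdef
          have hij : i0 = (j : Int) := by omega
          have hjs : search <+: (PySem.Chars.upper seg).drop j := by
            have h1 := (PySem.Chars.find_spec (s := PySem.Chars.upper seg) (sub := search) (by rw [← hi0]; omega)).1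
            rw [← hi0, ← hjdef] at h1; exact h1
          have hjb : j + search.length ≤ seg.length := by
            have h2 := hjs.length_le
            rw [List.length_drop, upper_length] at h2
            have hj3 : j ≤ (PySem.Chars.upper seg).length := by
              have := PySem.Chars.find_le_length (PySem.Chars.upper seg) search
              rw [← hi0] at this; omega
            rw [upper_length] at hj3
            omega
          rw [hdecomp]
          simp only [sLoop]
          rw [upper_append_semi, find_append_semi hs, if_neg hocc, ← hi0, if_neg (by omega)]
          rw [hij, PySem.Chars.findFrom_natCast (seg ++ ';' :: rest) [';'] j (by simp; omega)]
          rw [List.drop_append_of_le_length (by omega)]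
          rw [find_semi (fun hm => hnseg (List.mem_of_mem_drop hm))]
          rw [if_neg (by push_cast; omega)]
          have hc1 : ((j : Nat) : Int) + ((seg.drop j).length : Int) = ((j + (seg.length - j) : Nat) : Int) := by
            rw [List.length_drop]; push_cast; omega
          rw [hc1]
          rw [if_neg (show ¬((((List.drop j seg).length : Nat) : Int) = -1) by omega)]
          have hc2 : ((j : Nat) : Int) + (search.length : Int) = ((j + search.length : Nat) : Int) := by push_cast; ring
          rw [hc2, PySem.List.slice_natCast]
          rw [List.drop_append_of_le_length (by omega)]
          have hcnt : j + (seg.length - j) - (j + search.length) = (seg.drop (j + search.length)).length := by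
            rw [List.length_drop]; omega
          rw [hcnt, List.take_left' rfl]
          have hc3 : ((j + (seg.length - j) : Nat) : Int) + 1 = ((seg.length + 1 : Nat) : Int) := by push_cast; omega
          rw [hc3, Int.toNat_natCast]
          have hdp : (seg ++ ';' :: rest).drop (seg.length + 1) = rest := by
            rw [List.drop_append, List.drop_of_length_le (by omega)]
            rw [show seg.length + 1 - seg.length = 1 by omega]
            rfl
          rw [hdp]
          have hbs : bSeg search seg = some (fieldsOf (seg.drop (j + search.length))) := by
            simp only [bSeg]
            rw [← hi0, if_neg hocc, hij, hc2]
            rw [PySem.List.slice_from _ (by omega), Int.toNat_natCast]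
          rw [splitOn_cons hnseg, List.dropLast_cons_of_ne_nil (splitOn_ne_nil rest)]
          simp only [List.filterMap_cons, hbs]
          rw [ihn rest (by omega) fuel (by omega)]
    · rw [splitOn_no_semi hsem]
      rw [show ([t] : List (List Char)).dropLast = [] from rfl, List.filterMap_nil]
      cases fuel with
      | zero => omega
      | succ fuel =>
        simp only [sLoop]
        by_cases hneg : PySem.Chars.find (PySem.Chars.upper t) search = -1
        · simp [hneg]
        · have hge : 0 ≤ PySem.Chars.find (PySem.Chars.upper t) search := by
            have := PySem.Chars.neg_one_le_find (PySem.Chars.upper t) search; omega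
          set j := (PySem.Chars.find (PySem.Chars.upper t) search).toNat with hjdef
          have hij : PySem.Chars.find (PySem.Chars.upper t) search = (j : Int) := by omega
          have hjt : j ≤ t.length := by
            have := PySem.Chars.find_le_length (PySem.Chars.upper t) search
            rw [upper_length] at this; omega
          rw [if_neg hneg, hij, PySem.Chars.findFrom_natCast t [';'] j hjt]
          rw [find_no_semi (fun hm => hsem (List.mem_of_mem_drop hm))]
          simp

-- ===== VERDICT (by name: the statement is the Claim_ definition above) =====
theorem parse_idf_blocks_spec : Claim_equal_parse_idf_blocks := by
  intro idf_text object_type hdom hpre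
  simp only [Spec_parse_idf_blocks, parse_idf_blocks, parse_idf_blocks_alt]
  set clean := stripCommentsC idf_text.toList with hclean
  set search := PySem.Chars.upper object_type.toList ++ [','] with hsearch
  have hs : ';' ∉ search := by
    intro hm
    rcases List.mem_append.mp hm with h1 | h1
    · exact hpre ((mem_semi_upper _).mp h1)
    · simp at h1
  have hne : search ≠ [] := by simp [hsearch]
  have h1 := aLoop_eq_sLoop search clean (clean.length + 1) 0 (Nat.zero_le _)
  simp only [Nat.cast_zero, List.drop_zero] at h1
  rw [h1, sLoop_eq_bBody hne hs clean.length clean le_rfl (clean.length + 1) (by omega)]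
  rfl
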